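-- pv_equiv track=rewrite | github.com/frederik-lunde/nmai-prechallenge | bot.py | calculate_needed
-- ===== SOURCE A (Python) =====
-- def calculate_needed(order):
--     """Returns {item_type: count} still needed (required minus delivered)."""
--     needed = {}
--     for t in order["items_required"]:
--         needed[t] = needed.get(t, 0) + 1
--     for t in order["items_delivered"]:
--         if t in needed:
--             needed[t] -= 1
--             if needed[t] == 0:
--                 del needed[t]
--     return needed
-- ===== SOURCE B (Python) =====
-- def calculate_needed(order):
--     """Returns {item_type: count} still needed (required minus delivered)."""
--     req = order["items_required"]
--     dlv = order["items_delivered"]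
--     seen = set()
--     needed = {}
--     for t in req:
--         if t not in seen:
--             seen.add(t)
--             diff = req.count(t) - dlv.count(t)
--             if diff > 0:
--                 needed[t] = diff
--     return needed
-- ===== Notes on version B (the rewrite author's own statement) =====
-- stated objective: alternative
-- what changed: A builds a mutable tally of required items and then decrements/deletes entries while scanning the delivered list; B makes one pass over the required list with a seen-set and, for each distinct item, computes the count difference directly and keeps it only when positive.
import Mathlib
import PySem

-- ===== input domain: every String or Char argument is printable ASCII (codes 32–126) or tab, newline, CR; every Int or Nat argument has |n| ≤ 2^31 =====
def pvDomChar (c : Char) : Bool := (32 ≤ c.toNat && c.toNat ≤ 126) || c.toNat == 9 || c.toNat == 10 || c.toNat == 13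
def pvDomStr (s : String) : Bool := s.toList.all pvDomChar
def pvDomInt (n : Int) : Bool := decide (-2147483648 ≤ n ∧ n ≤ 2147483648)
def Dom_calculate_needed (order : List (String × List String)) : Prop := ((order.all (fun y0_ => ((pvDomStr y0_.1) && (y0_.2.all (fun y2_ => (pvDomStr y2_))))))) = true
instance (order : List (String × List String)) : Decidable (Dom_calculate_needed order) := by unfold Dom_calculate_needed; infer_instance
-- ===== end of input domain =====

-- B replaces A's build-a-tally-then-decrement-and-delete dict mutation with a single pass over
-- the required list guarded by a seen-set, computing each distinct item's count difference directly
-- (objective: alternative; return value only, neither program mutates its argument).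

-- ===== PORT A =====
def calculate_needed (order : List (String × List String)) : List (String × Int) :=
  match order.find? (fun p => p.1 == "items_required") with
  | none => []  -- KeyError "items_required": excluded by Pre_
  | some req =>
    match order.find? (fun p => p.1 == "items_delivered") with
    | none => []  -- KeyError "items_delivered": excluded by Pre_
    | some dlv =>
      let needed := req.2.foldl (fun d t => d.insert t (d.getD t 0 + 1)) PySem.Dict.empty
      let needed := dlv.2.foldl (fun d t =>
        if d.contains t then
          let d' := d.insert t (d.getD t 0 - 1)
          if d'.getD t 0 = 0 then d'.erase t else d'
        else d) needed
      needed.items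

-- ===== PORT B =====
def calculate_needed_alt (order : List (String × List String)) : List (String × Int) :=
  match order.find? (fun p => p.1 == "items_required") with
  | none => []  -- KeyError "items_required": excluded by Pre_
  | some req =>
    match order.find? (fun p => p.1 == "items_delivered") with
    | none => []  -- KeyError "items_delivered": excluded by Pre_
    | some dlv =>
      let r := req.2
      let d := dlv.2
      let st := r.foldl (fun (st : PySem.Set String × PySem.Dict String Int) t =>
        if PySem.Set.contains st.1 t then st
        else
          let seen := PySem.Set.add st.1 t
          let diff : Int := (r.count t : Int) - (d.count t : Int)
          if 0 < diff then (seen, st.2.insert t diff) else (seen, st.2))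
        (PySem.Set.empty, PySem.Dict.empty)
      st.2.items

-- ===== PRECONDITION & SPEC =====
-- Pre_ excludes exactly the inputs where Python A raises KeyError: a missing
-- "items_required" or "items_delivered" key (B raises there too).
def Pre_calculate_needed (order : List (String × List String)) : Prop :=
  (order.find? (fun p => p.1 == "items_required")).isSome = true ∧
  (order.find? (fun p => p.1 == "items_delivered")).isSome = true
instance (order : List (String × List String)) : Decidable (Pre_calculate_needed order) := by
  unfold Pre_calculate_needed; infer_instance
def pvWitness_calculate_needed : (List (String × List String)) :=
  [("items_required", ["a", "a", "b"]), ("items_delivered", ["a"])]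

def Spec_calculate_needed (order : List (String × List String)) (out : List (String × Int)) : Prop := out = calculate_needed_alt order
instance (order : List (String × List String)) (out : List (String × Int)) : Decidable (Spec_calculate_needed order out) := by unfold Spec_calculate_needed; infer_instance

-- ===== CLAIM (what is proved, stated in full; the proofs are below) =====
def Claim_equal_calculate_needed : Prop := ∀ (order : List (String × List String)), Dom_calculate_needed order → Pre_calculate_needed order → Spec_calculate_needed order (calculate_needed order)

-- ===== LEMMAS AND PROOFS =====

-- the positive-difference selector both sides reduce to
def pvF (r d : List String) (k : String) : Option (String × Int) :=
  if (d.count k : Int) < (r.count k : Int) then some (k, (r.count k : Int) - (d.count k : Int)) else none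

-- what B's loop appends while scanning suffix l with seen-set `seen`
def pvSpec (r d : List String) : List String → PySem.Set String → List (String × Int)
  | [], _ => []
  | t :: l, seen =>
    if PySem.Set.contains seen t then pvSpec r d l seen
    else (if (d.count t : Int) < (r.count t : Int) then [(t, (r.count t : Int) - (d.count t : Int))] else [])
         ++ pvSpec r d l (PySem.Set.add seen t)

theorem pv_key_unique {l : List (String × Int)} {t : String} {v : Int}
    (h : (l.map Prod.fst).Nodup) (hv : (t, v) ∈ l) :
    ∀ p ∈ l, p.1 = t → p = (t, v) := by
  intro p hp hpt
  exact List.inj_on_of_nodup_map h hp hv (by simpa using hpt)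

theorem pv_stepA_items (dict : PySem.Dict String Int) (t : String)
    (hnd : dict.keys.Nodup) :
    (if dict.contains t then
        (let d' := dict.insert t (dict.getD t 0 - 1);
         if d'.getD t 0 = 0 then d'.erase t else d')
      else dict).items
    = dict.items.filterMap (fun p =>
        if p.1 = t then (if p.2 = 1 then none else some (p.1, p.2 - 1)) else some p) := by
  by_cases hc : dict.contains t = true
  · obtain ⟨v, hv⟩ : ∃ v, dict.get? t = some v := by
      have := PySem.Dict.contains_eq_isSome_get? (d := dict) (k := t)
      rw [hc] at this
      exact Option.isSome_iff_exists.1 this.symm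
    have hmem : (t, v) ∈ dict.items := PySem.Dict.mem_items_of_get?_eq_some dict hv
    have hgd : dict.getD t 0 = v := PySem.Dict.getD_of_get?_eq_some _ _ hv
    have hnd' : (dict.items.map Prod.fst).Nodup := hnd
    have hins : (dict.insert t (v - 1)).items
        = dict.items.map (fun p => if (p.1 == t) = true then (t, v - 1) else p) :=
      PySem.Dict.items_insert_of_contains _ _ hc
    rw [if_pos hc]
    simp only [hgd]
    rw [PySem.Dict.getD_insert_self]
    by_cases hv1 : v - 1 = 0
    · rw [if_pos hv1]
      show ((dict.insert t (v-1)).erase t).items = _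
      simp only [PySem.Dict.erase, hins]
      rw [← List.filterMap_eq_map, List.filter_filterMap]
      apply List.filterMap_congr
      intro p hp
      by_cases hpt : p.1 = t
      · have hpv : p = (t, v) := pv_key_unique hnd' hmem p hp hpt
        have hv2 : v = 1 := by omega
        simp [hpv, hv2, Option.filter]
      · simp [hpt, Option.filter, Function.comp]
    · rw [if_neg hv1]
      show (dict.insert t (v-1)).items = _
      rw [hins, ← List.filterMap_eq_map]
      apply List.filterMap_congr
      intro p hp
      by_cases hpt : p.1 = t
      · have hpv : p = (t, v) := pv_key_unique hnd' hmem p hp hpt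
        have hv2 : v ≠ 1 := by omega
        simp [hpv, hv2, Function.comp]
      · simp [hpt, Function.comp]
  · rw [if_neg hc]
    have hne : ∀ p ∈ dict.items, p.1 ≠ t := by
      intro p hp hpt
      apply hc
      rw [PySem.Dict.contains_iff_mem_keys]
      exact hpt ▸ List.mem_map_of_mem hp
    calc dict.items = dict.items.filterMap some := by rw [List.filterMap_some]
      _ = _ := List.filterMap_congr (by intro p hp; rw [if_neg (hne p hp)])

theorem pv_keys_sub (t : String) (l : List (String × Int)) :
    ((l.filterMap (fun p =>
        if p.1 = t then (if p.2 = 1 then none else some (p.1, p.2 - 1)) else some p)).map Prod.fst).Sublist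
      (l.map Prod.fst) := by
  induction l with
  | nil => simp
  | cons p l ih =>
    rw [List.filterMap_cons]
    by_cases hpt : p.1 = t
    · by_cases hp1 : p.2 = 1
      · rw [if_pos hpt, if_pos hp1]
        exact ih.trans (List.sublist_cons_self _ _)
      · rw [if_pos hpt, if_neg hp1]
        simpa using ih.cons₂ p.1
    · rw [if_neg hpt]
      simpa using ih.cons₂ p.1

theorem pv_A_fold (ds : List String) :
    ∀ (dict : PySem.Dict String Int), dict.keys.Nodup → (∀ p ∈ dict.items, 0 < p.2) →
    (ds.foldl (fun d t =>
        if d.contains t then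
          let d' := d.insert t (d.getD t 0 - 1)
          if d'.getD t 0 = 0 then d'.erase t else d'
        else d) dict).items
    = dict.items.filterMap (fun p =>
        if (ds.count p.1 : Int) < p.2 then some (p.1, p.2 - (ds.count p.1 : Int)) else none) := by
  induction ds with
  | nil =>
    intro dict hnd hpos
    rw [List.foldl_nil]
    calc dict.items = dict.items.filterMap some := by rw [List.filterMap_some]
      _ = _ := List.filterMap_congr (by
          intro p hp
          have := hpos p hp
          simp only [List.count_nil, Nat.cast_zero, Int.sub_zero]
          rw [if_pos (by omega)])
  | cons t ds ih =>
    intro dict hnd hpos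
    rw [List.foldl_cons]
    have hstep := pv_stepA_items dict t hnd
    set step := fun (d : PySem.Dict String Int) t =>
        if d.contains t then
          let d' := d.insert t (d.getD t 0 - 1)
          if d'.getD t 0 = 0 then d'.erase t else d'
        else d with hstepdef
    have hnd2 : (step dict t).keys.Nodup := by
      show ((step dict t).items.map Prod.fst).Nodup
      rw [hstepdef]
      simp only []
      rw [hstep]
      exact (pv_keys_sub t dict.items).nodup hnd
    have hpos2 : ∀ p ∈ (step dict t).items, 0 < p.2 := by
      intro p hp
      rw [hstepdef] at hp
      simp only [] at hp
      rw [hstep] at hp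
      obtain ⟨q, hq, hgq⟩ := List.mem_filterMap.1 hp
      have hposq := hpos q hq
      by_cases hqt : q.1 = t
      · rw [if_pos hqt] at hgq
        by_cases hq1 : q.2 = 1
        · rw [if_pos hq1] at hgq; cases hgq
        · rw [if_neg hq1] at hgq
          obtain rfl := Option.some.inj hgq
          simp only
          omega
      · rw [if_neg hqt] at hgq
        obtain rfl := Option.some.inj hgq
        exact hposq
    rw [ih (step dict t) hnd2 hpos2]
    rw [hstepdef]
    simp only []
    rw [hstep, List.filterMap_filterMap]
    apply List.filterMap_congr
    intro p hp
    have hposp := hpos p hp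
    rcases p with ⟨k, v⟩
    simp only at hposp
    by_cases hpt : k = t
    · subst hpt
      rw [List.count_cons_self]
      by_cases hp1 : v = 1
      · subst hp1
        rw [if_pos rfl, if_pos rfl, Option.bind_none, if_neg (by push_cast; omega)]
      · rw [if_pos rfl, if_neg hp1, Option.bind_some]
        simp only
        by_cases hlt : (ds.count k : Int) < v - 1
        · rw [if_pos hlt, if_pos (by push_cast; omega)]
          have : v - 1 - (ds.count k : Int) = v - ((ds.count k + 1 : Nat) : Int) := by
            push_cast; ring
          rw [this]
        · rw [if_neg hlt, if_neg (by push_cast; omega)]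
    · rw [List.count_cons_of_ne (fun h => hpt h.symm), if_neg hpt, Option.bind_some]

theorem pv_B_fold (r d : List String) :
    ∀ (l : List String) (seen : PySem.Set String) (out : PySem.Dict String Int),
    (∀ k, out.contains k = true → k ∈ seen) →
    (l.foldl (fun (st : PySem.Set String × PySem.Dict String Int) t =>
        if PySem.Set.contains st.1 t then st
        else
          let seen := PySem.Set.add st.1 t
          let diff : Int := (r.count t : Int) - (d.count t : Int)
          if 0 < diff then (seen, st.2.insert t diff) else (seen, st.2))
      (seen, out)).2.items
    = out.items ++ pvSpec r d l seen := by
  intro l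
  induction l with
  | nil => intro seen out _; simp [pvSpec]
  | cons t l ih =>
    intro seen out hinv
    rw [List.foldl_cons]
    by_cases hm : t ∈ seen
    · have hc : PySem.Set.contains seen t = true := (PySem.Set.contains_iff seen t).2 hm
      simp only [hc, if_pos]
      rw [ih seen out hinv]
      simp [pvSpec, hm]
    · have hc : ¬ PySem.Set.contains seen t = true := fun h => hm ((PySem.Set.contains_iff seen t).1 h)
      rw [if_neg (by simp [hm])]
      have hout : out.contains t = false := by
        cases h : out.contains t with
        | false => rfl
        | true => exact absurd (hinv t h) hm
      have hinv' : ∀ k, (out.insert t ((r.count t : Int) - (d.count t : Int))).contains k = true → k ∈ seen.add t := by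
        intro k hk
        rw [PySem.Dict.contains_insert] at hk
        rcases Bool.or_eq_true_iff.1 hk with h | h
        · exact (PySem.Set.mem_add seen t k).2 (Or.inr (by simpa using h))
        · exact (PySem.Set.mem_add seen t k).2 (Or.inl (hinv k h))
      have hinv'' : ∀ k, out.contains k = true → k ∈ seen.add t := by
        intro k hk; exact (PySem.Set.mem_add seen t k).2 (Or.inl (hinv k hk))
      by_cases hd : (0 : Int) < (r.count t : Int) - (d.count t : Int)
      · rw [if_pos hd]
        rw [ih _ _ hinv']
        rw [PySem.Dict.items_insert_of_not_contains _ _ hout]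
        simp only [pvSpec, hc]
        rw [if_neg (by simp), if_pos (by omega), List.append_assoc]
      · rw [if_neg hd]
        rw [ih _ _ hinv'']
        simp only [pvSpec, hc]
        rw [if_neg (by simp), if_neg (by omega)]
        simp

theorem pv_bridge (r d : List String) :
    ∀ (l : List String) (seen : PySem.Set String),
    (PySem.Set.update seen l).filterMap (pvF r d)
    = seen.filterMap (pvF r d) ++ pvSpec r d l seen := by
  intro l
  induction l with
  | nil => intro seen; simp [PySem.Set.update, pvSpec]
  | cons t l ih =>
    intro seen
    have hup : PySem.Set.update seen (t :: l) = PySem.Set.update (seen.add t) l := by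
      simp [PySem.Set.update]
    rw [hup, ih (seen.add t)]
    by_cases hc : PySem.Set.contains seen t = true
    · have hm : t ∈ seen := (PySem.Set.contains_iff seen t).1 hc
      rw [PySem.Set.add_of_mem hm]
      simp only [pvSpec]
      rw [if_pos hc]
    · have hm : t ∉ seen := fun h => hc ((PySem.Set.contains_iff seen t).2 h)
      simp only [pvSpec]
      rw [if_neg hc, PySem.Set.add_of_not_mem hm, List.filterMap_append, List.append_assoc]
      congr 2
      by_cases hcond : (d.count t : Int) < (r.count t : Int)
      · have h' : List.count t d < List.count t r := by exact_mod_cast hcond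
        rw [if_pos hcond]; simp [pvF, h']
      · rw [if_neg hcond]; simp only [pvF, List.filterMap_cons, List.filterMap_nil]
        rw [if_neg hcond]

-- ===== VERDICT (by name: the statement is the Claim_ definition above) =====
theorem calculate_needed_spec : Claim_equal_calculate_needed := by
  intro order _ hpre
  obtain ⟨h1, h2⟩ := hpre
  obtain ⟨req, hreq⟩ := Option.isSome_iff_exists.1 h1
  obtain ⟨dlv, hdlv⟩ := Option.isSome_iff_exists.1 h2
  unfold Spec_calculate_needed calculate_needed calculate_needed_alt
  rw [hreq, hdlv]
  simp only []
  rw [PySem.Dict.foldl_insert_getD_add_one_eq_counter]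
  have hpos : ∀ p ∈ (PySem.Dict.counter req.2).items, 0 < p.2 := by
    intro p hp
    rw [PySem.Dict.items_counter] at hp
    obtain ⟨k, hk, rfl⟩ := List.mem_map.1 hp
    have : k ∈ req.2 := (PySem.Set.mem_ofList _ _).1 hk
    simp only []
    exact_mod_cast List.count_pos_iff.2 this
  rw [pv_A_fold dlv.2 _ (PySem.Dict.nodup_keys_counter req.2) hpos]
  rw [PySem.Dict.items_counter, List.filterMap_map]
  rw [pv_B_fold req.2 dlv.2 req.2 PySem.Set.empty PySem.Dict.empty
      (by intro k hk; rw [PySem.Dict.contains_empty] at hk; cases hk)]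
  have hup : PySem.Set.update PySem.Set.empty req.2 = PySem.Set.ofList req.2 := rfl
  have hbr := pv_bridge req.2 dlv.2 req.2 PySem.Set.empty
  rw [hup] at hbr
  simp only [PySem.Set.empty, List.filterMap_nil, List.nil_append] at hbr
  calc List.filterMap
        ((fun p => if ((dlv.2.count p.1 : Int)) < p.2 then some (p.1, p.2 - (dlv.2.count p.1 : Int)) else none) ∘
          fun k => (k, (req.2.count k : Int)))
        (PySem.Set.ofList req.2)
      = List.filterMap (pvF req.2 dlv.2) (PySem.Set.ofList req.2) := by
        apply List.filterMap_congr
        intro k _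
        simp [pvF, Function.comp]
    _ = pvSpec req.2 dlv.2 req.2 [] := hbr
    _ = PySem.Dict.empty.items ++ pvSpec req.2 dlv.2 req.2 PySem.Set.empty := rfl
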